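-- pv_equiv track=rewrite | github.com/anglil/translate_0 | oov_translate/utils.py | set_unk_for_string
-- ===== SOURCE A (Python) =====
-- def set_unk_for_string(in_string, vocab_set):
--     '''
--     used in dclm for setting UNK
--     params:
--         in_string: a document, with '\n', and delimited by ' '
--         vocab_set: vocabulary
--     '''
--     in_string_lines = in_string.split('\n')
--     in_string_lines_new = []
--     for line in in_string_lines:
--         l = line.split(' ')
--         l_new = [(item if item in vocab_set or item == '' else 'UNK') for item in l]
--         in_string_lines_new.append(' '.join(l_new))
--     return '\n'.join(in_string_lines_new)
-- ===== SOURCE B (Python) =====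
-- def set_unk_for_string(in_string, vocab_set):
--     '''
--     used in dclm for setting UNK
--     params:
--         in_string: a document, with '\n', and delimited by ' '
--         vocab_set: vocabulary
--     '''
--     # single left-to-right character scan: accumulate a token, flush it
--     # (unchanged if empty or in-vocab, else 'UNK') at each ' '/'\n' delimiter
--     out = []
--     tok = []
--     for ch in in_string:
--         if ch == ' ' or ch == '\n':
--             t = ''.join(tok)
--             out.append(t if t == '' or t in vocab_set else 'UNK')
--             out.append(ch)
--             tok = []
--         else:
--             tok.append(ch)
--     t = ''.join(tok)
--     out.append(t if t == '' or t in vocab_set else 'UNK')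
--     return ''.join(out)
-- ===== Notes on version B (the rewrite author's own statement) =====
-- stated objective: alternative
-- what changed: Replaces A's nested split('\n')/split(' ')/join passes with a single left-to-right character scan that accumulates the current token and flushes it (unchanged or as 'UNK') at each ' '/'\n' delimiter.
import Mathlib
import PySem

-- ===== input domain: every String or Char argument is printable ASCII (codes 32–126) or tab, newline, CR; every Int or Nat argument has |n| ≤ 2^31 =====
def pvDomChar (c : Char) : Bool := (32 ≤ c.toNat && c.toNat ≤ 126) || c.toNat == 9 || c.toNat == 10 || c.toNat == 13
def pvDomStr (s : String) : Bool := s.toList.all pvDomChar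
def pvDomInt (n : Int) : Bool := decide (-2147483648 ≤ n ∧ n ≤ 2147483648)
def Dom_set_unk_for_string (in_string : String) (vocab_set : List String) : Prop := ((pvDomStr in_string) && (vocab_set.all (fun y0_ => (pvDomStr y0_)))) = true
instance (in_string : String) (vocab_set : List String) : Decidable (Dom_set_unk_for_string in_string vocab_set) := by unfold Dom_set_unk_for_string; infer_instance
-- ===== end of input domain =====

-- B replaces A's nested split('\n')/split(' ')/join passes by a single left-to-right
-- character scan with a token accumulator (objective: alternative decomposition, similar cost).

-- ===== PORT A =====
-- A's per-token replacement: item if item in vocab_set or item == '' else 'UNK'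
def pvRepl (vocab_set : List String) (item : List Char) : List Char :=
  if vocab_set.contains (String.ofList item) || item == [] then item else ['U', 'N', 'K']

def set_unk_for_string (in_string : String) (vocab_set : List String) : String :=
  let in_string_lines := PySem.Chars.splitOn in_string.toList ['\n']
  let in_string_lines_new := in_string_lines.map (fun line =>
    let l := PySem.Chars.splitOn line [' ']
    let l_new := l.map (pvRepl vocab_set)
    PySem.Chars.join [' '] l_new)
  String.ofList (PySem.Chars.join ['\n'] in_string_lines_new)

-- ===== PORT B =====
-- B's flush of the accumulated token: t if t == '' or t in vocab_set else 'UNK'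
def pvFlush (vocab_set : List String) (tok : List Char) : List Char :=
  if tok == [] || vocab_set.contains (String.ofList tok) then tok else ['U', 'N', 'K']

-- the character loop of Source B: tok is the token accumulated so far
def pvScan (vocab_set : List String) (tok : List Char) : List Char → List Char
  | [] => pvFlush vocab_set tok
  | c :: rest =>
      if c == ' ' || c == '\n' then
        pvFlush vocab_set tok ++ c :: pvScan vocab_set [] rest
      else
        pvScan vocab_set (tok ++ [c]) rest

def set_unk_for_string_alt (in_string : String) (vocab_set : List String) : String :=
  String.ofList (pvScan vocab_set [] in_string.toList)

-- ===== PRECONDITION & SPEC =====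
def Spec_set_unk_for_string (in_string : String) (vocab_set : List String) (out : String) : Prop := out = set_unk_for_string_alt in_string vocab_set
instance (in_string : String) (vocab_set : List String) (out : String) : Decidable (Spec_set_unk_for_string in_string vocab_set out) := by unfold Spec_set_unk_for_string; infer_instance

-- ===== CLAIM (what is proved, stated in full; the proofs are below) =====
def Claim_equal_set_unk_for_string : Prop := ∀ (in_string : String) (vocab_set : List String), Dom_set_unk_for_string in_string vocab_set → Spec_set_unk_for_string in_string vocab_set (set_unk_for_string in_string vocab_set)

-- ===== LEMMAS AND PROOFS =====

-- reference single-character splitter (cur holds the current piece, reversed)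
def pvSplitAux (d : Char) (cur : List Char) : List Char → List (List Char)
  | [] => [cur.reverse]
  | c :: rest => if c = d then cur.reverse :: pvSplitAux d [] rest else pvSplitAux d (c :: cur) rest

theorem pvSplitOn_go_eq (d : Char) (fuel : Nat) :
    ∀ (l cur : List Char) (acc : List (List Char)), l.length ≤ fuel →
      PySem.Chars.splitOn.go [d] fuel l cur acc = acc.reverse ++ pvSplitAux d cur l := by
  induction fuel with
  | zero =>
      intro l cur acc h
      have : l = [] := List.length_eq_zero_iff.mp (Nat.le_zero.mp h)
      subst this
      simp [PySem.Chars.splitOn.go, pvSplitAux]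
  | succ n ih =>
      intro l cur acc h
      cases l with
      | nil => simp [PySem.Chars.splitOn.go, pvSplitAux]
      | cons c rest =>
          have hle : rest.length ≤ n := by simpa using h
          by_cases hc : c = d
          · subst hc
            have hpre : List.isPrefixOf [c] (c :: rest) = true := by
              simp [List.isPrefixOf]
            simp only [PySem.Chars.splitOn.go, hpre, if_pos]
            rw [ih _ _ _ (by simpa using hle)]
            simp [pvSplitAux]
          · have hpre : List.isPrefixOf [d] (c :: rest) = false := by
              simp [List.isPrefixOf]
              exact fun hh => (hc hh.symm).elim
            simp only [PySem.Chars.splitOn.go, hpre]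
            rw [ih _ _ _ hle]
            simp [pvSplitAux, hc]

theorem pvSplitOn_eq (d : Char) (s : List Char) :
    PySem.Chars.splitOn s [d] = pvSplitAux d [] s := by
  unfold PySem.Chars.splitOn
  rw [pvSplitOn_go_eq d (s.length + 1) s [] [] (by omega)]
  simp

theorem pvSplitAux_ne_nil (d : Char) (cur l : List Char) : pvSplitAux d cur l ≠ [] := by
  induction l generalizing cur with
  | nil => simp [pvSplitAux]
  | cons c rest ih =>
      by_cases hc : c = d <;> simp [pvSplitAux, hc, ih]

-- a delimiter-free prefix just accumulates
theorem pvSplitAux_free (d : Char) (pre : List Char) (hpre : ∀ c ∈ pre, c ≠ d) :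
    ∀ (cur l : List Char), pvSplitAux d cur (pre ++ l) = pvSplitAux d (pre.reverse ++ cur) l := by
  induction pre with
  | nil => simp
  | cons p ps ih =>
      intro cur l
      have hp : p ≠ d := hpre p (by simp)
      simp only [List.cons_append, pvSplitAux, if_neg hp]
      rw [ih (fun c hc => hpre c (by simp [hc])) (p :: cur) l]
      simp

theorem pvSplitAux_modifyHead (d : Char) (l : List Char) :
    ∀ cur, pvSplitAux d cur l = (pvSplitAux d [] l).modifyHead (cur.reverse ++ ·) := by
  induction l with
  | nil => intro cur; simp [pvSplitAux]
  | cons c rest ih =>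
      intro cur
      by_cases hc : c = d
      · simp [pvSplitAux, hc]
      · simp only [pvSplitAux, if_neg hc]
        rw [ih (c :: cur), ih [c]]
        obtain ⟨h, t, hht⟩ : ∃ h t, pvSplitAux d [] rest = h :: t := by
          cases hs : pvSplitAux d [] rest with
          | nil => exact absurd hs (pvSplitAux_ne_nil d [] rest)
          | cons h t => exact ⟨h, t, rfl⟩
        simp [hht]

-- splitting a delimiter-free token alone
theorem pvSplitAux_free_nil (d : Char) (tok : List Char) (htok : ∀ c ∈ tok, c ≠ d) :
    pvSplitAux d [] tok = [tok] := by
  have := pvSplitAux_free d tok htok [] []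
  simpa [pvSplitAux] using this

-- splitting tok ++ d :: rest where tok is d-free
theorem pvSplitAux_split_at (d : Char) (tok rest : List Char) (htok : ∀ c ∈ tok, c ≠ d) :
    pvSplitAux d [] (tok ++ d :: rest) = tok :: pvSplitAux d [] rest := by
  rw [pvSplitAux_free d tok htok [] (d :: rest)]
  simp [pvSplitAux]

-- splitting tok ++ e :: rest where tok is d-free and e ≠ d: e joins the first piece
theorem pvSplitAux_other (d e : Char) (tok rest : List Char) (htok : ∀ c ∈ tok, c ≠ d) (he : e ≠ d) :
    pvSplitAux d [] (tok ++ e :: rest) =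
      (pvSplitAux d [] rest).modifyHead ((tok ++ [e]) ++ ·) := by
  rw [pvSplitAux_free d tok htok [] (e :: rest)]
  simp only [pvSplitAux, if_neg he, List.append_nil]
  rw [pvSplitAux_modifyHead d rest (e :: tok.reverse)]
  simp

theorem pvJoin_head (sep a x : List Char) (ls : List (List Char)) :
    PySem.Chars.join sep ((a ++ x) :: ls) = a ++ PySem.Chars.join sep (x :: ls) := by
  cases ls with
  | nil => simp [PySem.Chars.join, List.intercalate]
  | cons y t => simp [PySem.Chars.join, List.intercalate]

theorem pvJoin_cons_cons (sep x y : List Char) (t : List (List Char)) :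
    PySem.Chars.join sep (x :: y :: t) = x ++ sep ++ PySem.Chars.join sep (y :: t) := by
  simp [PySem.Chars.join, List.intercalate]

theorem pvFlush_eq_repl (vs : List String) (t : List Char) : pvFlush vs t = pvRepl vs t := by
  unfold pvFlush pvRepl
  rcases h1 : (t == ([] : List Char)) <;> rcases h2 : vs.contains (String.ofList t) <;> simp

-- A's whole pipeline as a function of the character list
def pvAStr (vs : List String) (cs : List Char) : List Char :=
  PySem.Chars.join ['\n'] ((pvSplitAux '\n' [] cs).map (fun line =>
    PySem.Chars.join [' '] ((pvSplitAux ' ' [] line).map (pvRepl vs))))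

theorem pvScan_eq (vs : List String) (cs : List Char) :
    ∀ tok : List Char, (∀ c ∈ tok, c ≠ ' ' ∧ c ≠ '\n') →
      pvScan vs tok cs = pvAStr vs (tok ++ cs) := by
  induction cs with
  | nil =>
      intro tok htok
      simp only [pvScan, pvAStr, List.append_nil]
      rw [pvSplitAux_free_nil '\n' tok (fun c hc => (htok c hc).2)]
      rw [List.map_singleton]
      rw [pvSplitAux_free_nil ' ' tok (fun c hc => (htok c hc).1)]
      simp [PySem.Chars.join, List.intercalate, pvFlush_eq_repl]
  | cons c rest ih =>
      intro tok htok
      by_cases hsp : c = ' '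
      · subst hsp
        simp only [pvScan]
        rw [if_pos (show ((' ' == ' ' || ' ' == '\n') = true) by decide)]
        rw [ih [] (by simp)]
        unfold pvAStr
        simp only [List.nil_append]
        rw [pvSplitAux_other '\n' ' ' tok rest (fun c hc => (htok c hc).2) (by decide)]
        obtain ⟨s0, srest, hs⟩ : ∃ h t, pvSplitAux '\n' [] rest = h :: t := by
          cases hs : pvSplitAux '\n' [] rest with
          | nil => exact absurd hs (pvSplitAux_ne_nil '\n' [] rest)
          | cons h t => exact ⟨h, t, rfl⟩
        rw [hs]
        simp only [List.modifyHead, List.map_cons, List.append_assoc, List.singleton_append]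
        rw [pvSplitAux_split_at ' ' tok s0 (fun c hc => (htok c hc).1)]
        obtain ⟨t0, trest, ht⟩ : ∃ h t, pvSplitAux ' ' [] s0 = h :: t := by
          cases ht : pvSplitAux ' ' [] s0 with
          | nil => exact absurd ht (pvSplitAux_ne_nil ' ' [] s0)
          | cons h t => exact ⟨h, t, rfl⟩
        rw [ht]
        simp only [List.map_cons]
        rw [pvJoin_cons_cons]
        rw [pvFlush_eq_repl]
        rw [pvJoin_head ['\n'] (pvRepl vs tok ++ [' '])
          (PySem.Chars.join [' '] (pvRepl vs t0 :: trest.map (pvRepl vs))) (srest.map _)]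
        simp
      · by_cases hnl : c = '\n'
        · subst hnl
          simp only [pvScan]
          rw [if_pos (show (('\n' == ' ' || '\n' == '\n') = true) by decide)]
          rw [ih [] (by simp)]
          unfold pvAStr
          simp only [List.nil_append]
          rw [pvSplitAux_split_at '\n' tok rest (fun c hc => (htok c hc).2)]
          obtain ⟨s0, srest, hs⟩ : ∃ h t, pvSplitAux '\n' [] rest = h :: t := by
            cases hs : pvSplitAux '\n' [] rest with
            | nil => exact absurd hs (pvSplitAux_ne_nil '\n' [] rest)
            | cons h t => exact ⟨h, t, rfl⟩
          rw [hs]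
          simp only [List.map_cons]
          rw [pvJoin_cons_cons]
          rw [pvSplitAux_free_nil ' ' tok (fun c hc => (htok c hc).1)]
          simp [PySem.Chars.join, List.intercalate, pvFlush_eq_repl]
        · have hcond : (c == ' ' || c == '\n') = false := by
            simp [hsp, hnl]
          simp only [pvScan, hcond, Bool.false_eq_true, if_false]
          rw [ih (tok ++ [c]) (by
            intro x hx
            rcases List.mem_append.mp hx with h | h
            · exact htok x h
            · simp at h; subst h; exact ⟨hsp, hnl⟩)]
          simp

-- ===== VERDICT (by name: the statement is the Claim_ definition above) =====
theorem set_unk_for_string_spec : Claim_equal_set_unk_for_string := by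
  intro s vs _
  unfold Spec_set_unk_for_string set_unk_for_string set_unk_for_string_alt
  rw [pvScan_eq vs s.toList [] (by simp)]
  simp only [pvAStr, List.nil_append, pvSplitOn_eq]
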